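-- pv_equiv track=rewrite | github.com/Antonio-Ardigo/Remote-Project | arabic_pdf_translator/ocr/postprocessor.py | merge_ocr_results
-- ===== SOURCE A (Python) =====
-- def merge_ocr_results(results: list[str]) -> str:
--     """
--     Merge text from multiple OCR engines into a consensus result.
--
--     Uses line-by-line comparison to pick the best version of each line
--     across engines.
--     """
--     if not results:
--         return ""
--     if len(results) == 1:
--         return results[0]
--
--     # Split all results into lines
--     all_lines = [r.split('\n') for r in results]
--     max_lines = max(len(lines) for lines in all_lines)
--
--     merged = []
--     for i in range(max_lines):
--         candidates = []
--         for lines in all_lines: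
--             if i < len(lines) and lines[i].strip():
--                 candidates.append(lines[i].strip())
--
--         if not candidates:
--             continue
--
--         # Pick the longest non-empty candidate (usually most complete)
--         best = max(candidates, key=len)
--         merged.append(best)
--
--     return '\n'.join(merged)
-- ===== SOURCE B (Python) =====
-- def merge_ocr_results(results: list[str]) -> str:
--     """Merge OCR results: one row-wise pass keeping the best (longest stripped,
--     earliest wins ties) line per line index in a dict, then join in index order."""
--     if not results:
--         return ""
--     if len(results) == 1:
--         return results[0]
--
--     best = {}
--     max_lines = 0
--     for r in results:
--         lines = r.split('\n')
--         if max_lines < len(lines):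
--             max_lines = len(lines)
--         for i, line in enumerate(lines):
--             s = line.strip()
--             if s and (i not in best or len(best[i]) < len(s)):
--                 best[i] = s
--
--     return '\n'.join(best[i] for i in range(max_lines) if i in best)
-- ===== Notes on version B (the rewrite author's own statement) =====
-- stated objective: alternative
-- what changed: Replaces A's column-wise nested scan (for each line index, rescan every result and take max by length) with a single row-wise pass that keeps the best stripped line per index in a dict (strict > preserves the earliest-result tie-break) plus a running maximum line count, then joins the stored lines in index order.
import Mathlib
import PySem

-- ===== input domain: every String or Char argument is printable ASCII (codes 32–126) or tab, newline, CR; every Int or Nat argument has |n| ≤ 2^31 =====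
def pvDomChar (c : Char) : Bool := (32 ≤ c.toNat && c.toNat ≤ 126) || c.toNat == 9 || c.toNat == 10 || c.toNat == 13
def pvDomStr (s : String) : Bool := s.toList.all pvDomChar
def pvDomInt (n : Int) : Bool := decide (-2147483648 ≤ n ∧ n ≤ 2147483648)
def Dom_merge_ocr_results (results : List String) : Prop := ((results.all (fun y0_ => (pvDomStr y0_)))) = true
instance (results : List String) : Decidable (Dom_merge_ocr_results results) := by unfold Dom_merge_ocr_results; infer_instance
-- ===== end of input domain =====

-- B replaces A's column-wise rescan per line index by one row-wise pass keeping the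
-- best stripped line per index in a dict; alternative decomposition, same results.

-- ===== PORT A =====
def merge_ocr_results (results : List String) : String :=
  if results = [] then ""
  else if results.length = 1 then PySem.List.pyGetD results 0 ""
  else
    let all_lines := results.map (fun r => (PySem.Str.split? r "\n").getD [])
    let max_lines : Nat := (PySem.List.max? (all_lines.map (fun l => l.length)) (fun x => x)).getD 0
    let merged := (PySem.List.pyRange 0 (max_lines : Int)).foldl (fun merged i =>
      let candidates := all_lines.foldl (fun cs lines =>
        if i < (lines.length : Int) ∧ PySem.Str.strip (PySem.List.pyGetD lines i "") ≠ "" then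
          cs ++ [PySem.Str.strip (PySem.List.pyGetD lines i "")]
        else cs) []
      if candidates = [] then merged
      else merged ++ [(PySem.List.max? candidates PySem.Str.len).getD ""]) []
    PySem.Str.join "\n" merged

-- ===== PORT B =====
def merge_ocr_results_alt (results : List String) : String :=
  if results = [] then ""
  else if results.length = 1 then PySem.List.pyGetD results 0 ""
  else
    let st := results.foldl (fun (st : PySem.Dict Int String × Nat) r =>
      let lines := (PySem.Str.split? r "\n").getD []
      let ml := if st.2 < lines.length then lines.length else st.2
      let best := (PySem.List.enumerate lines).foldl (fun best p =>
        let s := PySem.Str.strip p.2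
        if s ≠ "" ∧ (best.contains p.1 = false ∨ PySem.Str.len (best.getD p.1 "") < PySem.Str.len s) then
          best.insert p.1 s
        else best) st.1
      (best, ml)) (PySem.Dict.empty, 0)
    PySem.Str.join "\n" ((PySem.List.pyRange 0 (st.2 : Int)).foldl (fun acc i =>
      match st.1.get? i with
      | some s => acc ++ [s]
      | none => acc) [])

-- ===== PRECONDITION & SPEC =====
def Spec_merge_ocr_results (results : List String) (out : String) : Prop := out = merge_ocr_results_alt results
instance (results : List String) (out : String) : Decidable (Spec_merge_ocr_results results out) := by unfold Spec_merge_ocr_results; infer_instance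

-- ===== CLAIM (what is proved, stated in full; the proofs are below) =====
def Claim_equal_merge_ocr_results : Prop := ∀ (results : List String), Dom_merge_ocr_results results → Spec_merge_ocr_results results (merge_ocr_results results)

-- ===== LEMMAS AND PROOFS =====

-- the per-result line split
def pvSplitRow (r : String) : List String := (PySem.Str.split? r "\n").getD []

-- running best (Python's max(…, key=len) accumulator)
def pvUpd (o : Option String) (x : String) : Option String :=
  match o with
  | none => some x
  | some m => if PySem.Str.len m < PySem.Str.len x then some x else some m

def pvCombine (o : Option String) (cs : List String) : Option String :=
  cs.foldl (fun acc x =>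
    match acc with
    | none => some x
    | some m => if PySem.Str.len m < PySem.Str.len x then some x else some m) o

-- A's candidate list for line index i
def pvCandA (rows : List (List String)) (i : Int) : List String :=
  (rows.filter (fun L =>
      decide (i < (L.length : Int) ∧ PySem.Str.strip (PySem.List.pyGetD L i "") ≠ ""))).map
    (fun L => PySem.Str.strip (PySem.List.pyGetD L i ""))

-- B's loop bodies, named
def pvBStep (best : PySem.Dict Int String) (p : Int × String) : PySem.Dict Int String :=
  if PySem.Str.strip p.2 ≠ "" ∧ (best.contains p.1 = false ∨
      PySem.Str.len (best.getD p.1 "") < PySem.Str.len (PySem.Str.strip p.2)) then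
    best.insert p.1 (PySem.Str.strip p.2)
  else best

def pvOuterStep (st : PySem.Dict Int String × Nat) (r : String) : PySem.Dict Int String × Nat :=
  let lines := pvSplitRow r
  let ml := if st.2 < lines.length then lines.length else st.2
  let best := (PySem.List.enumerate lines).foldl pvBStep st.1
  (best, ml)

lemma pvCombine_nil (o : Option String) : pvCombine o [] = o := rfl
lemma pvCombine_cons (o : Option String) (x : String) (t : List String) :
    pvCombine o (x :: t) = pvCombine (pvUpd o x) t := rfl
lemma pvCombine_append (o : Option String) (a b : List String) :
    pvCombine o (a ++ b) = pvCombine (pvCombine o a) b := List.foldl_append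

lemma pvMax?_eq_combine (cs : List String) :
    PySem.List.max? cs PySem.Str.len = pvCombine none cs := by
  unfold PySem.List.max? pvCombine
  congr 1
  funext acc x
  cases acc <;> simp

lemma pvCandA_cons (L : List String) (rows : List (List String)) (i : Int) :
    pvCandA (L :: rows) i =
      (if i < (L.length : Int) ∧ PySem.Str.strip (PySem.List.pyGetD L i "") ≠ "" then
        [PySem.Str.strip (PySem.List.pyGetD L i "")] else []) ++ pvCandA rows i := by
  simp only [pvCandA, List.filter_cons]
  by_cases h : (i < (L.length : Int) ∧ PySem.Str.strip (PySem.List.pyGetD L i "") ≠ "")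
  · simp [h]
  · simp [h]

-- the inner fold never touches keys below its start index
lemma pvInner_preserve (lines : List String) (s : Int) (d : PySem.Dict Int String) (i : Int)
    (hi : i < s) :
    ((PySem.List.enumerate lines s).foldl pvBStep d).get? i = d.get? i := by
  induction lines generalizing s d with
  | nil => rfl
  | cons x xs ih =>
    rw [PySem.List.enumerate_cons, List.foldl_cons, ih _ _ (by omega)]
    unfold pvBStep
    split_ifs with h
    · exact PySem.Dict.get?_insert_of_ne d _ (by omega)
    · rfl

-- the inner fold at key s+k performs exactly the single update for line k
lemma pvInner_main (lines : List String) (s : Int) (d : PySem.Dict Int String) (k : Nat) :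
    ((PySem.List.enumerate lines s).foldl pvBStep d).get? (s + k) =
      (if k < lines.length ∧ PySem.Str.strip (lines.getD k "") ≠ "" then
        pvUpd (d.get? (s + k)) (PySem.Str.strip (lines.getD k ""))
      else d.get? (s + k)) := by
  induction lines generalizing s d k with
  | nil => simp [PySem.List.enumerate]
  | cons x xs ih =>
    rw [PySem.List.enumerate_cons, List.foldl_cons]
    cases k with
    | zero =>
      have hpres := pvInner_preserve xs (s + 1) (pvBStep d (s, x)) (s + ((0 : Nat) : Int))
        (by push_cast; omega)
      rw [hpres]
      simp only [Nat.cast_zero, add_zero, List.getD_cons_zero, List.length_cons]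
      by_cases hx : PySem.Str.strip x = ""
      · have hb : pvBStep d (s, x) = d := by
          unfold pvBStep
          exact if_neg (by simp [hx])
        rw [hb, if_neg (by simp [hx])]
      · rw [if_pos (show 0 < xs.length + 1 ∧ PySem.Str.strip x ≠ "" from ⟨Nat.succ_pos _, hx⟩)]
        cases hg : d.get? s with
        | none =>
          have hcont : d.contains s = false := by
            rw [PySem.Dict.contains_eq_isSome_get?, hg]; rfl
          have hb : pvBStep d (s, x) = d.insert s (PySem.Str.strip x) := by
            unfold pvBStep
            exact if_pos ⟨hx, Or.inl hcont⟩
          rw [hb, PySem.Dict.get?_insert_self]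
          rfl
        | some b =>
          have hgd : d.getD s "" = b := by
            rw [PySem.Dict.getD_eq_get?_getD, hg]; rfl
          have hcont : d.contains s = true := by
            rw [PySem.Dict.contains_eq_isSome_get?, hg]; rfl
          by_cases hlt : PySem.Str.len b < PySem.Str.len (PySem.Str.strip x)
          · have hb : pvBStep d (s, x) = d.insert s (PySem.Str.strip x) := by
              unfold pvBStep
              exact if_pos ⟨hx, Or.inr (by rw [hgd]; exact hlt)⟩
            rw [hb, PySem.Dict.get?_insert_self]
            show some (PySem.Str.strip x) =
              if PySem.Str.len b < PySem.Str.len (PySem.Str.strip x) then some (PySem.Str.strip x)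
              else some b
            rw [if_pos hlt]
          · have hb : pvBStep d (s, x) = d := by
              unfold pvBStep
              refine if_neg ?_
              rintro ⟨-, hc | hl⟩
              · rw [hcont] at hc; exact Bool.noConfusion hc
              · rw [hgd] at hl; exact hlt hl
            rw [hb, hg]
            show some b =
              if PySem.Str.len b < PySem.Str.len (PySem.Str.strip x) then some (PySem.Str.strip x)
              else some b
            rw [if_neg hlt]
    | succ k' =>
      have hkey : s + ((k' : Nat) + 1 : Nat) = (s + 1) + (k' : Nat) := by push_cast; ring
      rw [hkey, ih (s + 1) (pvBStep d (s, x)) k']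
      have hpre : (pvBStep d (s, x)).get? (s + 1 + (k' : Nat)) = d.get? (s + 1 + (k' : Nat)) := by
        unfold pvBStep
        split_ifs with h
        · exact PySem.Dict.get?_insert_of_ne d _ (by omega)
        · rfl
      rw [hpre]
      simp only [List.getD_cons_succ, List.length_cons, Nat.add_lt_add_iff_right]

-- the outer fold's dict agrees with A's per-index candidate maximum
lemma pvOuter (rs : List String) (d : PySem.Dict Int String) (m : Nat) (k : Nat) :
    ((rs.foldl pvOuterStep (d, m)).1).get? (k : Int) =
      pvCombine (d.get? (k : Int)) (pvCandA (rs.map pvSplitRow) (k : Int)) := by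
  induction rs generalizing d m with
  | nil => rfl
  | cons r rs ih =>
    rw [List.foldl_cons, List.map_cons, pvCandA_cons, pvCombine_append]
    have hstep : rs.foldl pvOuterStep (pvOuterStep (d, m) r) =
        rs.foldl pvOuterStep (((PySem.List.enumerate (pvSplitRow r)).foldl pvBStep d),
          (if m < (pvSplitRow r).length then (pvSplitRow r).length else m)) := rfl
    rw [hstep, ih]
    congr 1
    have h0 : ((PySem.List.enumerate (pvSplitRow r)).foldl pvBStep d).get? ((k : Nat) : Int) =
        ((PySem.List.enumerate (pvSplitRow r) 0).foldl pvBStep d).get? (0 + (k : Nat)) := by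
      norm_num
    rw [h0, pvInner_main]
    have hidx : PySem.List.pyGetD (pvSplitRow r) ((k : Nat) : Int) "" = (pvSplitRow r).getD k "" := by
      simp [PySem.List.pyGetD_natCast]
    by_cases hc : k < (pvSplitRow r).length ∧ PySem.Str.strip ((pvSplitRow r).getD k "") ≠ ""
    · rw [if_pos hc]
      rw [if_pos (⟨by exact_mod_cast hc.1, by rw [hidx]; exact hc.2⟩ :
        ((k : Nat) : Int) < _ ∧ _)]
      simp only [pvCombine_cons, pvCombine_nil, hidx]
      norm_num
    · rw [if_neg hc]
      rw [if_neg (by rw [hidx]; intro h; exact hc ⟨by exact_mod_cast h.1, h.2⟩)]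
      simp only [pvCombine_nil]
      norm_num

-- the outer fold's running maximum is the fold of line counts
lemma pvOuterMl (rs : List String) (d : PySem.Dict Int String) (m : Nat) :
    (rs.foldl pvOuterStep (d, m)).2 = ((rs.map pvSplitRow).map List.length).foldl max m := by
  induction rs generalizing d m with
  | nil => rfl
  | cons r rs ih =>
    rw [List.foldl_cons, List.map_cons, List.map_cons, List.foldl_cons]
    have hstep : pvOuterStep (d, m) r =
        (((PySem.List.enumerate (pvSplitRow r)).foldl pvBStep d),
          (if m < (pvSplitRow r).length then (pvSplitRow r).length else m)) := rfl
    rw [hstep, ih]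
    congr 1
    split_ifs <;> omega

-- the two result-building folds over the index range are equal
lemma pvFinal (rows : List (List String)) (best : PySem.Dict Int String)
    (hbest : ∀ k : Nat, best.get? (k : Int) = PySem.List.max? (pvCandA rows (k : Int)) PySem.Str.len)
    (ks : List Nat) (acc : List String) :
    (ks.map (fun k : Nat => (k : Int))).foldl (fun merged i =>
      let candidates := rows.foldl (fun cs lines =>
        if i < (lines.length : Int) ∧ PySem.Str.strip (PySem.List.pyGetD lines i "") ≠ "" then
          cs ++ [PySem.Str.strip (PySem.List.pyGetD lines i "")]
        else cs) []
      if candidates = [] then merged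
      else merged ++ [(PySem.List.max? candidates PySem.Str.len).getD ""]) acc =
    (ks.map (fun k : Nat => (k : Int))).foldl (fun acc i =>
      match best.get? i with
      | some s => acc ++ [s]
      | none => acc) acc := by
  induction ks generalizing acc with
  | nil => rfl
  | cons k ks ih =>
    rw [List.map_cons, List.foldl_cons, List.foldl_cons]
    have hcand : rows.foldl (fun cs lines =>
        if (k : Int) < (lines.length : Int) ∧ PySem.Str.strip (PySem.List.pyGetD lines (k : Int) "") ≠ "" then
          cs ++ [PySem.Str.strip (PySem.List.pyGetD lines (k : Int) "")]
        else cs) [] = pvCandA rows (k : Int) := by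
      rw [PySem.List.foldl_append_ite
        (fun lines => (k : Int) < (lines.length : Int) ∧ PySem.Str.strip (PySem.List.pyGetD lines (k : Int) "") ≠ "")
        (fun lines => PySem.Str.strip (PySem.List.pyGetD lines (k : Int) "")) rows []]
      rfl
    simp only [hcand, hbest k]
    by_cases hnil : pvCandA rows (k : Int) = []
    · rw [if_pos hnil]
      rw [show PySem.List.max? (pvCandA rows (k : Int)) PySem.Str.len = none from
        (PySem.List.max?_eq_none_iff _ _).mpr hnil]
      exact ih acc
    · rw [if_neg hnil]
      cases hm : PySem.List.max? (pvCandA rows (k : Int)) PySem.Str.len with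
      | none => exact absurd ((PySem.List.max?_eq_none_iff _ _).mp hm) hnil
      | some b => exact ih (acc ++ [b])

-- the index range as a list of casts of naturals
lemma pvRange_cast (M : Nat) :
    PySem.List.pyRange 0 (M : Int) = (List.range M).map (fun k : Nat => (k : Int)) := by
  rw [PySem.List.pyRange_one 0 (M : Int)]
  simp

-- max over nonempty lengths list equals the fold from 0
lemma pvMaxLines (x : Nat) (t : List Nat) :
    (PySem.List.max? (x :: t) (fun y => y)).getD 0 = (x :: t).foldl max 0 := by
  rw [PySem.List.max?_id_cons]
  simp [List.foldl_cons]

-- the main branch equality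
theorem pv_main (results : List String) (h1 : ¬results = []) (h2 : ¬results.length = 1) :
    merge_ocr_results results = merge_ocr_results_alt results := by
  unfold merge_ocr_results merge_ocr_results_alt
  rw [if_neg h1, if_neg h1, if_neg h2, if_neg h2]
  show PySem.Str.join "\n"
      ((PySem.List.pyRange 0
          (((PySem.List.max? ((results.map pvSplitRow).map (fun l => l.length))
              (fun x => x)).getD 0 : Nat) : Int)).foldl
        (fun merged i =>
          let candidates := (results.map pvSplitRow).foldl (fun cs lines =>
            if i < (lines.length : Int) ∧ PySem.Str.strip (PySem.List.pyGetD lines i "") ≠ "" then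
              cs ++ [PySem.Str.strip (PySem.List.pyGetD lines i "")]
            else cs) []
          if candidates = [] then merged
          else merged ++ [(PySem.List.max? candidates PySem.Str.len).getD ""]) []) =
    PySem.Str.join "\n"
      ((PySem.List.pyRange 0
          (((results.foldl pvOuterStep (PySem.Dict.empty, 0)).2 : Nat) : Int)).foldl
        (fun acc i =>
          match (results.foldl pvOuterStep (PySem.Dict.empty, 0)).1.get? i with
          | some s => acc ++ [s]
          | none => acc) [])
  have hM : ((PySem.List.max? ((results.map pvSplitRow).map (fun l => l.length))
      (fun x => x)).getD 0 : Nat) = (results.foldl pvOuterStep (PySem.Dict.empty, 0)).2 := by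
    rw [pvOuterMl]
    obtain ⟨r0, rs, hr⟩ : ∃ r0 rs, results = r0 :: rs := by
      cases results with
      | nil => exact absurd rfl h1
      | cons a b => exact ⟨a, b, rfl⟩
    subst hr
    simp only [List.map_cons]
    exact pvMaxLines (pvSplitRow r0).length ((rs.map pvSplitRow).map List.length)
  rw [← hM, pvRange_cast]
  exact congrArg (PySem.Str.join "\n") (pvFinal (results.map pvSplitRow) (results.foldl pvOuterStep (PySem.Dict.empty, 0)).1
    (fun k => by rw [pvOuter results PySem.Dict.empty 0 k, pvMax?_eq_combine]; rfl)
    (List.range ((PySem.List.max? ((results.map pvSplitRow).map (fun l => l.length))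
      (fun x => x)).getD 0)) [])

-- ===== VERDICT (by name: the statement is the Claim_ definition above) =====
theorem merge_ocr_results_spec : Claim_equal_merge_ocr_results := by
  intro results _
  unfold Spec_merge_ocr_results
  by_cases h1 : results = []
  · subst h1; rfl
  · by_cases h2 : results.length = 1
    · unfold merge_ocr_results merge_ocr_results_alt
      rw [if_neg h1, if_neg h1, if_pos h2, if_pos h2]
    · exact pv_main results h1 h2
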